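-- pv_equiv track=rewrite | github.com/gaigutherz/Akkademia | akkadian/parse_xml.py | clean_translations
-- ===== SOURCE A (Python) =====
-- def clean_translations(translations):
--     """
--     Canonise translations and clean them from unnecessary chars
--     :param translations: all translations we got out of the xml file
--     :return: final translation to be used for the NLP algorithms
--     """
--     final_translations = {}
--
--     for key in translations:
--         tr = translations[key]
--
--         # Canonize the apostrophe, erase square brackets and replace new lines with spaces.
--         tr = tr.replace("´", "'").replace("′", "'").replace("[", "").replace("]", "").replace("\n", " ")
--
--         # The translation doesn't contain any content, so we can't use it.
--         if "No translation possible" in tr or "No translation warranted" in tr or "broken for translation" in tr or \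
--                 "fragmentary for translation" in tr or tr.replace(" ", "").replace(".", "") == "":
--             continue
--
--         start_index = 0
--         while start_index < len(tr):
--             index = tr.find(".", start_index, len(tr))
--             if index != -1:
--                 end_index = index
--                 while end_index < len(tr) and (tr[end_index] == "." or tr[end_index] == " "):
--                     end_index += 1
--                 sub_tr = tr[index:end_index]
--                 if sub_tr == ".":
--                     start_index = index + 1
--                 elif sub_tr == ". ":
--                     start_index = index + 2
--                 else:
--                     tr = tr[:index] + "... " + tr[end_index:]
--                     start_index = index + 4
--             else:
--                 start_index = len(tr)
--
--         final_translations[key] = tr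
--
--     return final_translations
-- ===== SOURCE B (Python) =====
-- def clean_translations(translations):
--     """Single left-to-right pass: each maximal run of dots/spaces starting at a
--     dot is kept if it is "." or ". ", otherwise replaced by "... "."""
--     skip_markers = ("No translation possible", "No translation warranted",
--                     "broken for translation", "fragmentary for translation")
--     out = {}
--     for key, tr in translations.items():
--         tr = (tr.replace("´", "'").replace("′", "'")
--                 .replace("[", "").replace("]", "").replace("\n", " "))
--         if any(m in tr for m in skip_markers) or tr.replace(" ", "").replace(".", "") == "":
--             continue
--         pieces = []
--         i, n = 0, len(tr)
--         while i < n: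
--             c = tr[i]
--             if c == ".":
--                 j = i + 1
--                 while j < n and (tr[j] == "." or tr[j] == " "):
--                     j += 1
--                 run = tr[i:j]
--                 pieces.append(run if run in (".", ". ") else "... ")
--                 i = j
--             else:
--                 pieces.append(c)
--                 i += 1
--         out[key] = "".join(pieces)
--     return out
-- ===== Notes on version B (the rewrite author's own statement) =====
-- stated objective: alternative
-- what changed: A repeatedly re-scans the string with find() and rebuilds it by slicing+concatenation inside a while loop; B makes a single left-to-right pass collecting pieces (each maximal dot/space run starting at a dot is kept if '.' or '. ', else replaced by '... ') and joins them once at the end.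
import Mathlib
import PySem

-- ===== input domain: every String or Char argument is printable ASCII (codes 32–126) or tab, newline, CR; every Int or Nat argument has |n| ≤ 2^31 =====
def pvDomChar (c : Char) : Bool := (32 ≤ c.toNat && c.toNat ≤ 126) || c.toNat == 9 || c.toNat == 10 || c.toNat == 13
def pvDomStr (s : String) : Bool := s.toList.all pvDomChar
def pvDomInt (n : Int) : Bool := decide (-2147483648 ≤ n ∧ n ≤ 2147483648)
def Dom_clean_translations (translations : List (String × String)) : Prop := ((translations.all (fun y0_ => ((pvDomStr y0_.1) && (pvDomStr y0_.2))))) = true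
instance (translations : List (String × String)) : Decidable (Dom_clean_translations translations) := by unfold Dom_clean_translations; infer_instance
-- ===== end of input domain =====

-- B replaces A's find/slice/rebuild while-loop by a single left-to-right pass
-- that classifies each maximal dot/space run once and never rebuilds the string.


-- ===== PORT A =====
-- A's chained .replace canonicalisation.
def aCanon (tr : String) : String :=
  PySem.Str.replace (PySem.Str.replace (PySem.Str.replace (PySem.Str.replace
    (PySem.Str.replace tr "´" "'") "′" "'") "[" "") "]" "") "\n" " "

-- A's skip condition (the big `if … : continue`).
def aSkip (tr : String) : Bool :=
  PySem.Str.isIn "No translation possible" tr || PySem.Str.isIn "No translation warranted" tr ||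
  PySem.Str.isIn "broken for translation" tr || PySem.Str.isIn "fragmentary for translation" tr ||
  (PySem.Str.replace (PySem.Str.replace tr " " "") "." "" == "")

-- inner `while end_index < len(tr) and (tr[end_index] == "." or tr[end_index] == " ")`.
theorem pvRunEndDec (tr : List Char) (e : Nat) (c : Char) (h : tr[e]? = some c) :
    tr.length - (e + 1) < tr.length - e := by
  have := (List.getElem?_eq_some_iff.mp h).1
  omega

def aRunEnd (tr : List Char) (e : Nat) : Nat :=
  match h : tr[e]? with
  | some c => if c == '.' || c == ' ' then aRunEnd tr (e + 1) else e
  | none => e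
termination_by tr.length - e
decreasing_by
  exact pvRunEndDec tr e c h

-- facts needed by aCollapse's termination, cited there by name
theorem aRunEnd_le (tr : List Char) (e : Nat) (he : e ≤ tr.length) : aRunEnd tr e ≤ tr.length := by
  fun_induction aRunEnd tr e with
  | case1 e c h hp ih => exact ih (by have := (List.getElem?_eq_some_iff.mp h).1; omega)
  | case2 e c h hp => exact he
  | case3 e h => exact he

theorem aRunEnd_ge (tr : List Char) (e : Nat) : e ≤ aRunEnd tr e := by
  fun_induction aRunEnd tr e with
  | case1 e c h hp ih => omega
  | case2 e c h hp => exact le_refl _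
  | case3 e h => exact le_refl _

theorem aRunEnd_gt_of_dot (tr : List Char) (e : Nat) (h : tr[e]? = some '.') :
    e + 1 ≤ aRunEnd tr e := by
  have hge := aRunEnd_ge tr (e + 1)
  unfold aRunEnd
  rw [h]
  simp
  omega

theorem pvFindFrom_some_len (tr sub : List Char) (st : Int) :
    PySem.Chars.findFrom tr sub st (some (tr.length : Int)) = PySem.Chars.findFrom tr sub st none := by
  unfold PySem.Chars.findFrom
  have h0 : ¬((tr.length : Int) < 0) := by omega
  simp [h0, Int.toNat_natCast, List.take_length]

theorem pv_dot_prefix_iff (l : List Char) (j : Nat) : ['.'] <+: l.drop j ↔ l[j]? = some '.' := by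
  rw [← List.head?_drop]
  cases hm : l.drop j with
  | nil => simp
  | cons a t =>
    constructor
    · rintro ⟨u, hu⟩
      simp at hu
      simp [hu.1.symm]
    · intro hh
      simp at hh
      exact ⟨t, by rw [hh]; rfl⟩

theorem pvFindFrom_facts (tr : List Char) (s : Nat) (hs : s < tr.length)
    (h : PySem.Chars.findFrom tr ['.'] (s : Int) (some (tr.length : Int)) ≠ -1) :
    s ≤ (PySem.Chars.findFrom tr ['.'] (s : Int) (some (tr.length : Int))).toNat ∧
    tr[(PySem.Chars.findFrom tr ['.'] (s : Int) (some (tr.length : Int))).toNat]? = some '.' := by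
  rw [pvFindFrom_some_len] at h ⊢
  obtain ⟨h1, h2, _⟩ := PySem.Chars.findFrom_natCast_spec tr ['.'] s (le_of_lt hs) h
  exact ⟨by omega, (pv_dot_prefix_iff tr _).mp h2⟩

theorem pvCollapseDec12 (tr : List Char) (start : Nat) (hs : start < tr.length)
    (hidx : PySem.Chars.findFrom tr ['.'] (start : Int) (some (tr.length : Int)) ≠ -1)
    (m : Nat) (hm : (PySem.Chars.findFrom tr ['.'] (start : Int) (some (tr.length : Int))).toNat < m) :
    tr.length - m < tr.length - start := by
  have hf := pvFindFrom_facts tr start hs hidx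
  omega

theorem pvCollapseDec3 (tr : List Char) (start : Nat) (hs : start < tr.length)
    (hidx : PySem.Chars.findFrom tr ['.'] (start : Int) (some (tr.length : Int)) ≠ -1) :
    (PySem.List.slice tr none (some ((PySem.Chars.findFrom tr ['.'] (start : Int) (some (tr.length : Int))).toNat : Int)) ++ "... ".toList ++
     PySem.List.slice tr (some ((aRunEnd tr (PySem.Chars.findFrom tr ['.'] (start : Int) (some (tr.length : Int))).toNat : Nat) : Int)) none).length -
      ((PySem.Chars.findFrom tr ['.'] (start : Int) (some (tr.length : Int))).toNat + 4) < tr.length - start := by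
  have hf := pvFindFrom_facts tr start hs hidx
  have h1 := aRunEnd_gt_of_dot tr _ hf.2
  have hilen : (PySem.Chars.findFrom tr ['.'] (start : Int) (some (tr.length : Int))).toNat < tr.length :=
    (List.getElem?_eq_some_iff.mp hf.2).1
  have h2 := aRunEnd_le tr (PySem.Chars.findFrom tr ['.'] (start : Int) (some (tr.length : Int))).toNat (by omega)
  rw [PySem.List.slice_to_natCast, PySem.List.slice_from_natCast]
  simp [List.length_take, List.length_drop]
  omega

-- outer `while start_index < len(tr)` loop of A, on code points
def aCollapse (tr : List Char) (start : Nat) : List Char :=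
  if hs : start < tr.length then
    let idx := PySem.Chars.findFrom tr ['.'] (start : Int) (some (tr.length : Int))
    if hidx : idx ≠ -1 then
      let i := idx.toNat
      let e := aRunEnd tr i
      let sub := PySem.List.slice tr (some (i : Int)) (some (e : Int))
      if sub = ['.'] then aCollapse tr (i + 1)
      else if sub = ['.', ' '] then aCollapse tr (i + 2)
      else aCollapse (PySem.List.slice tr none (some (i : Int)) ++ "... ".toList ++
                      PySem.List.slice tr (some (e : Int)) none) (i + 4)
    else tr
  else tr
termination_by tr.length - start
decreasing_by
  · exact pvCollapseDec12 tr start hs hidx _ (Nat.lt_succ_self _)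
  · exact pvCollapseDec12 tr start hs hidx _ (by omega)
  · exact pvCollapseDec3 tr start hs hidx

-- A: dict loop — for each key (insertion order, unique keys) canonise, maybe skip, collapse, store
def clean_translations (translations : List (String × String)) : List (String × String) :=
  ((PySem.Dict.ofList translations).items.foldl
    (fun acc kv =>
      let tr := aCanon kv.2
      if aSkip tr then acc
      else acc.insert kv.1 (String.ofList (aCollapse tr.toList 0)))
    PySem.Dict.empty).items

-- ===== PORT B =====
def bCanon (tr : String) : String :=
  PySem.Str.replace (PySem.Str.replace (PySem.Str.replace (PySem.Str.replace
    (PySem.Str.replace tr "´" "'") "′" "'") "[" "") "]" "") "\n" " "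

def bUsable (tr : String) : Bool :=
  !(PySem.Str.isIn "No translation possible" tr || PySem.Str.isIn "No translation warranted" tr ||
    PySem.Str.isIn "broken for translation" tr || PySem.Str.isIn "fragmentary for translation" tr ||
    (PySem.Str.replace (PySem.Str.replace tr " " "") "." "" == ""))

-- B's single pass; takeWhile/dropWhile port the inner `while j < n and tr[j] in {'.', ' '}` run scan exactly
def bPieces (l : List Char) : List Char :=
  match l with
  | [] => []
  | c :: rest =>
    if c == '.' then
      let run := c :: rest.takeWhile (fun x => x == '.' || x == ' ')
      let rest' := rest.dropWhile (fun x => x == '.' || x == ' ')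
      (if run = ['.'] ∨ run = ['.', ' '] then run else "... ".toList) ++ bPieces rest'
    else c :: bPieces rest
termination_by l.length
decreasing_by
  · exact Nat.lt_succ_of_le (List.length_dropWhile_le (fun x => x == '.' || x == ' ') rest)
  · exact Nat.lt_succ_self _

def clean_translations_alt (translations : List (String × String)) : List (String × String) :=
  (PySem.Dict.ofList translations).items.filterMap
    (fun kv =>
      let tr := bCanon kv.2
      if bUsable tr then some (kv.1, String.ofList (bPieces tr.toList)) else none)

-- ===== PRECONDITION & SPEC =====
def Spec_clean_translations (translations : List (String × String)) (out : List (String × String)) : Prop := out = clean_translations_alt translations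
instance (translations : List (String × String)) (out : List (String × String)) : Decidable (Spec_clean_translations translations out) := by unfold Spec_clean_translations; infer_instance

-- ===== CLAIM (what is proved, stated in full; the proofs are below) =====
def Claim_equal_clean_translations : Prop := ∀ (translations : List (String × String)), Dom_clean_translations translations → Spec_clean_translations translations (clean_translations translations)

-- ===== LEMMAS AND PROOFS =====

theorem pv_dropWhile_eq_drop (p : Char → Bool) (l : List Char) :
    l.dropWhile p = l.drop (l.takeWhile p).length := by
  calc l.dropWhile p = List.drop (l.takeWhile p).length (l.takeWhile p ++ l.dropWhile p) :=
        List.drop_left.symm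
    _ = l.drop (l.takeWhile p).length := by rw [List.takeWhile_append_dropWhile]

theorem aRunEnd_eq (tr : List Char) (e : Nat) :
    aRunEnd tr e = e + ((tr.drop e).takeWhile (fun x => x == '.' || x == ' ')).length := by
  fun_induction aRunEnd tr e with
  | case1 e c h hp ih =>
      obtain ⟨hlt, hc⟩ := List.getElem?_eq_some_iff.mp h
      rw [List.drop_eq_getElem_cons hlt, hc, ih]
      simp [List.takeWhile_cons, hp]
      omega
  | case2 e c h hp =>
      obtain ⟨hlt, hc⟩ := List.getElem?_eq_some_iff.mp h
      rw [List.drop_eq_getElem_cons hlt, hc]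
      simp at hp
      simp [List.takeWhile_cons, hp]
  | case3 e h =>
      rw [List.drop_eq_nil_of_le (List.getElem?_eq_none_iff.mp h)]
      simp

theorem bPieces_nil : bPieces [] = [] := by rw [bPieces]

theorem bPieces_cons_nodot (c : Char) (rest : List Char) (hc : c ≠ '.') :
    bPieces (c :: rest) = c :: bPieces rest := by
  rw [bPieces]
  simp [hc]

theorem bPieces_append_nodot (u v : List Char) (h : ∀ c ∈ u, c ≠ '.') :
    bPieces (u ++ v) = u ++ bPieces v := by
  induction u with
  | nil => simp
  | cons c t ih =>
      rw [List.cons_append, bPieces_cons_nodot c _ (h c (by simp)),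
          ih (fun c hc => h c (by simp [hc]))]
      rfl

theorem bPieces_nodot (l : List Char) (h : ∀ c ∈ l, c ≠ '.') : bPieces l = l := by
  have := bPieces_append_nodot l [] h
  simpa [bPieces_nil] using this

theorem pv_step (tr : List Char) (s : Nat) (hs : s < tr.length)
    (hidx : PySem.Chars.findFrom tr ['.'] (s : Int) (some (tr.length : Int)) ≠ -1)
    (i e : Nat) (sub : List Char)
    (hi : i = (PySem.Chars.findFrom tr ['.'] (s : Int) (some (tr.length : Int))).toNat)
    (he : e = aRunEnd tr i)
    (hsub : sub = PySem.List.slice tr (some (i : Int)) (some (e : Int))) :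
    s ≤ i ∧ i < tr.length ∧ e = i + sub.length ∧ e ≤ tr.length ∧
    tr.take e = tr.take i ++ sub ∧
    tr.take i = tr.take s ++ (tr.drop s).take (i - s) ∧
    bPieces (tr.drop s)
      = (tr.drop s).take (i - s) ++
        ((if sub = ['.'] ∨ sub = ['.', ' '] then sub else "... ".toList) ++ bPieces (tr.drop e)) := by
  have hfacts := pvFindFrom_facts tr s hs hidx
  rw [← hi] at hfacts
  obtain ⟨hsi, hdot⟩ := hfacts
  obtain ⟨hilen, hc⟩ := List.getElem?_eq_some_iff.mp hdot
  have hD : tr.drop i = '.' :: tr.drop (i + 1) := by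
    rw [List.drop_eq_getElem_cons hilen, hc]
  have hTW : (tr.drop i).takeWhile (fun x => x == '.' || x == ' ')
      = '.' :: (tr.drop (i + 1)).takeWhile (fun x => x == '.' || x == ' ') := by
    rw [hD]
    simp [List.takeWhile_cons]
  have he' : e = i + ((tr.drop i).takeWhile (fun x => x == '.' || x == ' ')).length := by
    rw [he, aRunEnd_eq]
  have hTWlen : ((tr.drop i).takeWhile (fun x => x == '.' || x == ' ')).length ≤ tr.length - i := by
    have h1 := (List.takeWhile_prefix (p := fun x => x == '.' || x == ' ') (l := tr.drop i)).length_le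
    simp at h1
    omega
  have hsub' : sub = (tr.drop i).takeWhile (fun x => x == '.' || x == ' ') := by
    rw [hsub, PySem.List.slice_natCast]
    have hpre := List.takeWhile_prefix (p := fun x => x == '.' || x == ' ') (l := tr.drop i)
    rw [List.prefix_iff_eq_take] at hpre
    rw [he']
    simpa using hpre.symm
  have hlen : e = i + sub.length := by rw [hsub', ← he']
  have htake_e : tr.take e = tr.take i ++ sub := by
    rw [hlen, List.take_add, hsub']
    congr 1
    have hpre := List.takeWhile_prefix (p := fun x => x == '.' || x == ' ') (l := tr.drop i)
    rw [List.prefix_iff_eq_take] at hpre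
    rw [← hsub', hsub', ← hpre]
  have htake_i : tr.take i = tr.take s ++ (tr.drop s).take (i - s) := by
    have h0 : i = s + (i - s) := by omega
    rw [h0, List.take_add, Nat.add_sub_cancel_left]
  -- the prefix between s and i contains no dot (minimality of find)
  have hmin : ∀ j, s ≤ j → j < i → ¬ (['.'] <+: tr.drop j) := by
    have h' := hidx
    rw [pvFindFrom_some_len] at h'
    obtain ⟨_, _, h3⟩ := PySem.Chars.findFrom_natCast_spec tr ['.'] s (le_of_lt hs) h'
    rw [← pvFindFrom_some_len] at h3
    rw [← hi] at h3
    exact fun j h1 h2 => h3 j h1 h2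
  have hnodot : ∀ c ∈ (tr.drop s).take (i - s), c ≠ '.' := by
    intro c hcu hceq
    obtain ⟨m, hm, hum⟩ := List.mem_iff_getElem.mp hcu
    have hmlen : m < i - s := by
      have := List.length_take_le (i - s) (tr.drop s)
      omega
    have hms : s + m < tr.length := by omega
    have hval : tr[s + m]'hms = c := by
      rw [← hum]
      rw [List.getElem_take, List.getElem_drop]
    have := hmin (s + m) (by omega) (by omega)
    apply this
    rw [pv_dot_prefix_iff]
    rw [List.getElem?_eq_getElem hms, hval, hceq]
  have hdecomp : tr.drop s = (tr.drop s).take (i - s) ++ tr.drop i := by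
    conv_lhs => rw [← List.take_append_drop (i - s) (tr.drop s)]
    rw [List.drop_drop]
    congr 2
    omega
  have hrest' : (tr.drop (i + 1)).dropWhile (fun x => x == '.' || x == ' ') = tr.drop e := by
    rw [pv_dropWhile_eq_drop, List.drop_drop]
    congr 1
    have h1 : ((tr.drop i).takeWhile (fun x => x == '.' || x == ' ')).length
        = ((tr.drop (i + 1)).takeWhile (fun x => x == '.' || x == ' ')).length + 1 := by
      rw [hTW]
      simp
    omega
  have hbp : bPieces (tr.drop s)
      = (tr.drop s).take (i - s) ++
        ((if sub = ['.'] ∨ sub = ['.', ' '] then sub else "... ".toList) ++ bPieces (tr.drop e)) := by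
    conv_lhs => rw [hdecomp]
    rw [bPieces_append_nodot _ _ hnodot]
    congr 1
    rw [hD, bPieces]
    simp only [beq_self_eq_true, if_pos]
    rw [hrest']
    congr 1
    rw [hsub', hTW]
  exact ⟨hsi, hilen, hlen, by omega, htake_e, htake_i, hbp⟩

theorem pv_collapse_eq (tr : List Char) (s : Nat) :
    aCollapse tr s = tr.take s ++ bPieces (tr.drop s) := by
  fun_induction aCollapse tr s with
  | case1 tr s hs idx hidx i e sub hsub1 ih =>
      obtain ⟨hsi, hilen, hlen, hle, htke, htki, hbp⟩ :=
        pv_step tr s hs hidx i e sub rfl rfl rfl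
      have he1 : i + 1 = e := by
        rw [hsub1] at hlen
        simp at hlen
        omega
      rw [ih, he1, htke, htki, hbp, hsub1]
      simp [List.append_assoc]
  | case2 tr s hs idx hidx i e sub hsub1 hsub2 ih =>
      obtain ⟨hsi, hilen, hlen, hle, htke, htki, hbp⟩ :=
        pv_step tr s hs hidx i e sub rfl rfl rfl
      have he2 : i + 2 = e := by
        rw [hsub2] at hlen
        simp at hlen
        omega
      rw [ih, he2, htke, htki, hbp, hsub2]
      simp [List.append_assoc]
  | case3 tr s hs idx hidx i e sub hsub1 hsub2 ih =>
      obtain ⟨hsi, hilen, hlen, hle, htke, htki, hbp⟩ :=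
        pv_step tr s hs hidx i e sub rfl rfl rfl
      rw [PySem.List.slice_to_natCast, PySem.List.slice_from_natCast] at ih
      have hlenA : (tr.take i).length = i := by
        simp
        omega
      have hAB : ((tr.take i) ++ "... ".toList).length = i + 4 := by
        simp [hlenA]
      rw [List.take_left' hAB, List.drop_left' hAB] at ih
      rw [PySem.List.slice_to_natCast, PySem.List.slice_from_natCast, ih, htki, hbp]
      simp [List.append_assoc, hsub1, hsub2]
  | case4 tr s hs idx hidx =>
      simp only [not_not] at hidx
      have hidx' : PySem.Chars.findFrom tr ['.'] (s : Int) (some (tr.length : Int)) = -1 := hidx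
      rw [pvFindFrom_some_len] at hidx'
      rw [PySem.Chars.findFrom_natCast_eq_neg_one_iff tr ['.'] s (le_of_lt hs)] at hidx'
      have hnodot : ∀ c ∈ tr.drop s, c ≠ '.' := by
        intro c hc hceq
        apply hidx'
        obtain ⟨u, v, huv⟩ := List.append_of_mem hc
        exact ⟨u, v, by rw [huv, hceq]; simp⟩
      rw [bPieces_nodot _ hnodot, List.take_append_drop]
  | case5 tr s hs =>
      rw [List.drop_eq_nil_of_le (by omega), bPieces_nil,
          List.take_of_length_le (by omega)]
      simp


theorem pv_items_foldl (l : List (String × String)) (d : PySem.Dict String String)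
    (p : String × String → Bool) (g : String × String → String)
    (hfresh : ∀ kv ∈ l, d.contains kv.1 = false)
    (hnd : (l.map Prod.fst).Nodup) :
    (l.foldl (fun acc kv => if p kv then acc else acc.insert kv.1 (g kv)) d).items
      = d.items ++ l.filterMap (fun kv => if p kv then none else some (kv.1, g kv)) := by
  induction l generalizing d with
  | nil => simp
  | cons kv t ih =>
      simp only [List.map_cons, List.nodup_cons] at hnd
      by_cases hp : p kv
      · simp only [List.foldl_cons, List.filterMap_cons, hp, if_true]
        exact ih d (fun kv' h' => hfresh kv' (by simp [h'])) hnd.2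
      · have hfr : d.contains kv.1 = false := hfresh kv (by simp)
        simp only [List.foldl_cons, List.filterMap_cons, if_neg hp]
        rw [ih (d.insert kv.1 (g kv)) ?fresh hnd.2,
            PySem.Dict.items_insert_of_not_contains d (g kv) hfr]
        · simp
        case fresh =>
          intro kv' h'
          rw [PySem.Dict.contains_insert]
          have hne : kv'.1 ≠ kv.1 := by
            intro hh
            exact hnd.1 (hh ▸ List.mem_map_of_mem h')
          simp [hne, hfresh kv' (by simp [h'])]

-- ===== VERDICT (by name: the statement is the Claim_ definition above) =====
theorem clean_translations_spec : Claim_equal_clean_translations := by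
  intro translations _hdom
  unfold Spec_clean_translations clean_translations clean_translations_alt
  have hnd : (((PySem.Dict.ofList translations).items).map Prod.fst).Nodup := by
    have h := PySem.Dict.nodup_keys_ofList translations
    simpa [PySem.Dict.keys] using h
  have hfresh : ∀ kv ∈ (PySem.Dict.ofList translations).items,
      (PySem.Dict.empty : PySem.Dict String String).contains kv.1 = false :=
    fun kv _ => PySem.Dict.contains_empty kv.1
  rw [pv_items_foldl (PySem.Dict.ofList translations).items PySem.Dict.empty
        (fun kv => aSkip (aCanon kv.2))
        (fun kv => String.ofList (aCollapse (aCanon kv.2).toList 0)) hfresh hnd]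
  have hempty : (PySem.Dict.empty : PySem.Dict String String).items = [] := by
    simp [PySem.Dict.empty]
  rw [hempty, List.nil_append]
  apply List.filterMap_congr
  intro kv _
  show (if aSkip (aCanon kv.2) then none
        else some (kv.1, String.ofList (aCollapse (aCanon kv.2).toList 0)))
      = (if bUsable (bCanon kv.2) then some (kv.1, String.ofList (bPieces (bCanon kv.2).toList)) else none)
  have hcanon : bCanon kv.2 = aCanon kv.2 := rfl
  have husable : bUsable (bCanon kv.2) = !(aSkip (aCanon kv.2)) := rfl
  rw [husable]
  cases h : aSkip (aCanon kv.2) with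
  | true => simp [h]
  | false =>
      simp only [h, Bool.not_false, if_true, if_false]
      have := pv_collapse_eq (aCanon kv.2).toList 0
      simp at this
      rw [hcanon, this]
      simp
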